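-- pv_equiv track=rewrite | github.com/SSSayon/DSA-python | hw/Week5/Week5.py | T2
-- ===== SOURCE A (Python) =====
-- class Queue():
--     def __init__(self):
--         self.items = []
--     def isEmpty(self):
--         return self.items == []
--     def enqueue(self, item):
--         self.items.append(item)
--     def dequeue(self):
--         return self.items.pop(0)
--     def size(self):
--         return len(self.items)
--
-- def T2(lst):
--     output = []
--     q = Queue()
--     n = len(lst)
--     for i in range(n):
--         q.enqueue(lst[i])
--         pt, cnt = i+1, 0
--         while pt < n and lst[pt] == lst[i]:
--             cnt += 1
--             pt += 1
--         while q.items[0] < lst[i] - 10000: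
--             q.dequeue()
--         output.append(q.size() + cnt)
--     return output
-- ===== SOURCE B (Python) =====
-- def T2(lst):
--     n = len(lst)
--     run = [0] * n
--     for i in range(n - 2, -1, -1):
--         if lst[i] == lst[i + 1]:
--             run[i] = run[i + 1] + 1
--     output = []
--     left = 0
--     for i in range(n):
--         while lst[left] < lst[i] - 10000:
--             left += 1
--         output.append(i - left + 1 + run[i])
--     return output
-- ===== Notes on version B (the rewrite author's own statement) =====
-- stated objective: faster
-- what changed: Replaces A's per-index forward scan for equal runs and O(n) list-queue pops with precomputed backward run lengths and a persistent two-pointer window, turning O(n^2) into O(n).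
import Mathlib
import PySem

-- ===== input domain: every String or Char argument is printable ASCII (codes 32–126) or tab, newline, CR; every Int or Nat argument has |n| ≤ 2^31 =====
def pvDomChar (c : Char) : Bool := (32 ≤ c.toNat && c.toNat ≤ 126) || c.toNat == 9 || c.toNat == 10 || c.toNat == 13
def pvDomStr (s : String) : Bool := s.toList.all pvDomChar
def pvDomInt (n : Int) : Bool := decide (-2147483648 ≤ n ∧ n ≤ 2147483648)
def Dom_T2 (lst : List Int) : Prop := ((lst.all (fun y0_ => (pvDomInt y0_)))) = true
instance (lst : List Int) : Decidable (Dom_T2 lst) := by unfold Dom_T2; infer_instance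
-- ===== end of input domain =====

-- B replaces A's per-index forward run scan and list-queue with precomputed backward
-- run lengths and a persistent two-pointer window: O(n) instead of O(n^2).

-- ===== PORT A =====
-- the inner `while pt < n and lst[pt] == lst[i]` loop (cnt counts its iterations);
-- indices are always in range in A, so getD is exact
def T2cnt (lst : List Int) (v : Int) (pt : Nat) : Int :=
  if h : pt < lst.length ∧ lst.getD pt 0 = v then T2cnt lst v (pt + 1) + 1 else 0
termination_by lst.length - pt
decreasing_by omega

-- the `while q.items[0] < lst[i] - 10000: q.dequeue()` loop; q always contains lst[i]
-- itself, so the queue never empties ([] is unreachable)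
def T2pop (t : Int) : List Int → List Int
  | [] => []
  | x :: xs => if x < t - 10000 then T2pop t xs else x :: xs

-- one iteration of A's `for i in range(n)` body, state = (output, q.items)
def T2step (lst : List Int) (st : List Int × List Int) (i : Nat) : List Int × List Int :=
  let q := T2pop (lst.getD i 0) (st.2 ++ [lst.getD i 0])
  (st.1 ++ [(q.length : Int) + T2cnt lst (lst.getD i 0) (i + 1)], q)

def T2 (lst : List Int) : List Int :=
  ((List.range lst.length).foldl (T2step lst) ([], [])).1

-- ===== PORT B =====
-- B's backward fill `for i in range(n-2,-1,-1): if lst[i]==lst[i+1]: run[i]=run[i+1]+1`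
-- as structural recursion from the right (same values, computed in the same order)
def T2runs : List Int → List Int
  | [] => []
  | [_] => [0]
  | x :: y :: rest => (if x = y then (T2runs (y :: rest)).headD 0 + 1 else 0) :: T2runs (y :: rest)

-- B's `while lst[left] < lst[i] - 10000: left += 1`; the `left < lst.length` guard is a
-- totality guard only (the loop always stops at left = i, since lst[i] < lst[i]-10000 fails)
def T2left (lst : List Int) (t : Int) (left : Nat) : Nat :=
  if h : left < lst.length ∧ lst.getD left 0 < t - 10000 then T2left lst t (left + 1) else left
termination_by lst.length - left
decreasing_by omega

-- one iteration of B's forward loop, state = (output, left)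
def T2altStep (lst run : List Int) (st : List Int × Nat) (i : Nat) : List Int × Nat :=
  let left := T2left lst (lst.getD i 0) st.2
  (st.1 ++ [(i : Int) - (left : Int) + 1 + run.getD i 0], left)

def T2_alt (lst : List Int) : List Int :=
  ((List.range lst.length).foldl (T2altStep lst (T2runs lst)) ([], 0)).1

-- ===== PRECONDITION & SPEC =====
def Spec_T2 (lst : List Int) (out : List Int) : Prop := out = T2_alt lst
instance (lst : List Int) (out : List Int) : Decidable (Spec_T2 lst out) := by unfold Spec_T2; infer_instance

-- ===== CLAIM (what is proved, stated in full; the proofs are below) =====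
def Claim_equal_T2 : Prop := ∀ (lst : List Int), Dom_T2 lst → Spec_T2 lst (T2 lst)

-- ===== LEMMAS AND PROOFS =====

-- reference count: leading elements equal to v
def cntSpec (v : Int) : List Int → Int
  | [] => 0
  | x :: xs => if x = v then cntSpec v xs + 1 else 0

lemma T2pop_cons (t x : Int) (xs : List Int) :
    T2pop t (x :: xs) = if x < t - 10000 then T2pop t xs else x :: xs := rfl

lemma T2cnt_eq_cntSpec (lst : List Int) (v : Int) (pt : Nat) :
    T2cnt lst v pt = cntSpec v (lst.drop pt) := by
  rw [T2cnt]
  split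
  · rename_i h
    have hd : lst.drop pt = lst.getD pt 0 :: lst.drop (pt + 1) := by
      rw [List.getD_eq_getElem lst 0 h.1]
      exact List.drop_eq_getElem_cons h.1
    rw [hd, cntSpec, if_pos h.2, T2cnt_eq_cntSpec lst v (pt + 1)]
  · rename_i h
    by_cases hlt : pt < lst.length
    · have hv : ¬ lst.getD pt 0 = v := fun hv => h ⟨hlt, hv⟩
      have hd : lst.drop pt = lst.getD pt 0 :: lst.drop (pt + 1) := by
        rw [List.getD_eq_getElem lst 0 hlt]
        exact List.drop_eq_getElem_cons hlt
      rw [hd, cntSpec, if_neg hv]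
    · rw [List.drop_eq_nil_of_le (by omega)]
      rfl
termination_by lst.length - pt
decreasing_by omega

lemma T2runs_getD (lst : List Int) (i : Nat) (h : i < lst.length) :
    (T2runs lst).getD i 0 = cntSpec (lst.getD i 0) (lst.drop (i + 1)) := by
  induction lst using T2runs.induct generalizing i with
  | case1 => simp at h
  | case2 x =>
    match i with
    | 0 => simp [T2runs, cntSpec]
    | i + 1 => simp at h
  | case3 x y rest ih =>
    match i with
    | 0 =>
      have h1 := ih 0 (by simp)
      simp only [List.getD_cons_zero, List.drop_succ_cons, List.drop_zero] at h1
      have h0 : (T2runs (y :: rest)).headD 0 = cntSpec y rest := by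
        rw [← h1]
        cases T2runs (y :: rest) <;> rfl
      by_cases hxy : x = y
      · subst hxy
        simp [T2runs, cntSpec]
        rw [← h0]
        cases T2runs (x :: rest) <;> rfl
      · have hyx : ¬ y = x := fun hyx => hxy hyx.symm
        simp [T2runs, cntSpec, hxy, hyx]
    | i + 1 =>
      have h1 := ih i (by simpa using h)
      simpa [T2runs] using h1

lemma T2left_pop (lst : List Int) (t : Int) (k left : Nat) (hlk : left ≤ k)
    (hk : k < lst.length) (hstop : ¬ lst.getD k 0 < t - 10000) :
    T2pop t ((lst.take (k + 1)).drop left) = (lst.take (k + 1)).drop (T2left lst t left)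
      ∧ T2left lst t left ≤ k := by
  have hleft : left < lst.length := by omega
  have h1 : left < (lst.take (k + 1)).length := by simp; omega
  have hd : (lst.take (k + 1)).drop left
      = lst.getD left 0 :: (lst.take (k + 1)).drop (left + 1) := by
    rw [List.getD_eq_getElem lst 0 hleft, ← List.getElem_take (i := left) (h := h1)]
    exact List.drop_eq_getElem_cons h1
  rw [T2left]
  split
  · rename_i h
    have hlk' : left + 1 ≤ k := by
      by_contra hcon
      have he : left = k := by omega
      rw [he] at h
      exact hstop h.2
    have ih := T2left_pop lst t k (left + 1) hlk' hk hstop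
    rw [hd, T2pop_cons, if_pos h.2]
    exact ih
  · rename_i h
    have hv : ¬ lst.getD left 0 < t - 10000 := fun hv => h ⟨hleft, hv⟩
    rw [hd, T2pop_cons, if_neg hv]
    exact ⟨rfl, hlk⟩
termination_by k - left
decreasing_by omega

lemma T2fold (lst : List Int) (c k left : Nat) (outA outB q : List Int)
    (hlk : left ≤ k) (hc : k + c = lst.length)
    (hq : q = (lst.take k).drop left) (ho : outA = outB) :
    ((List.range' k c).foldl (T2step lst) (outA, q)).1
      = ((List.range' k c).foldl (T2altStep lst (T2runs lst)) (outB, left)).1 := by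
  induction c generalizing k left outA outB q with
  | zero => simpa using ho
  | succ c ih =>
    rw [List.range'_succ, List.foldl_cons, List.foldl_cons]
    have hk : k < lst.length := by omega
    have hstop : ¬ lst.getD k 0 < lst.getD k 0 - 10000 := by omega
    have hq1 : q ++ [lst.getD k 0] = (lst.take (k + 1)).drop left := by
      rw [hq, List.take_add_one, List.getElem?_eq_getElem hk,
        List.drop_append_of_le_length (by simp; omega),
        List.getD_eq_getElem lst 0 hk]
      rfl
    obtain ⟨hpop, hle⟩ := T2left_pop lst (lst.getD k 0) k left hlk hk hstop
    set left' := T2left lst (lst.getD k 0) left with hl'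
    have hqq : T2pop (lst.getD k 0) (q ++ [lst.getD k 0]) = (lst.take (k + 1)).drop left' := by
      rw [hq1]; exact hpop
    have hlen : ((lst.take (k + 1)).drop left').length = k + 1 - left' := by
      simp; omega
    have hcnt : T2cnt lst (lst.getD k 0) (k + 1) = (T2runs lst).getD k 0 := by
      rw [T2cnt_eq_cntSpec, T2runs_getD lst k hk]
    have hc2 : ((k + 1 - left' : Nat) : Int) = (k : Int) - (left' : Int) + 1 := by omega
    have hA : T2step lst (outA, q) k
        = (outA ++ [(k : Int) - (left' : Int) + 1 + (T2runs lst).getD k 0],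
           (lst.take (k + 1)).drop left') := by
      simp only [T2step, hqq, hlen, hcnt, hc2]
    have hB : T2altStep lst (T2runs lst) (outB, left) k
        = (outB ++ [(k : Int) - (left' : Int) + 1 + (T2runs lst).getD k 0], left') := rfl
    rw [hA, hB, ho]
    exact ih (k + 1) left' _ _ _ (by omega) (by omega) rfl rfl

-- ===== VERDICT (by name: the statement is the Claim_ definition above) =====
theorem T2_spec : Claim_equal_T2 := by
  intro lst _
  unfold Spec_T2 T2 T2_alt
  rw [List.range_eq_range']
  exact T2fold lst lst.length 0 0 [] [] [] (le_refl 0) (by omega) rfl rfl
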